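-- pv_equiv track=rewrite | github.com/technolooogia/domains | app.py | get_price_ranges
-- ===== SOURCE A (Python) =====
-- def get_price_ranges(domains):
--     """Get price range distribution"""
--     ranges = {
--         'under_20': 0,
--         '20_to_50': 0,
--         '50_to_100': 0,
--         'over_100': 0
--     }
--
--     for domain in domains:
--         price = domain.get('price', 0)
--         if price < 20:
--             ranges['under_20'] += 1
--         elif price < 50:
--             ranges['20_to_50'] += 1
--         elif price < 100:
--             ranges['50_to_100'] += 1
--         else:
--             ranges['over_100'] += 1
--
--     return ranges
-- ===== SOURCE B (Python) =====
-- def get_price_ranges(domains):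
--     """Get price range distribution"""
--     prices = [d.get('price', 0) for d in domains]
--     # cumulative counts below each boundary, then difference consecutive cuts
--     cuts = [0] + [sum(1 for p in prices if p < b) for b in (20, 50, 100)] + [len(prices)]
--     keys = ['under_20', '20_to_50', '50_to_100', 'over_100']
--     return {k: hi - lo for k, lo, hi in zip(keys, cuts, cuts[1:])}
-- ===== Notes on version B (the rewrite author's own statement) =====
-- stated objective: alternative
-- what changed: A counts each domain into one of four buckets with an if/elif cascade updating a counter dict; B instead computes cumulative 'count below each boundary' totals over the extracted price list and takes differences of consecutive cuts to build the dict.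
import Mathlib
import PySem

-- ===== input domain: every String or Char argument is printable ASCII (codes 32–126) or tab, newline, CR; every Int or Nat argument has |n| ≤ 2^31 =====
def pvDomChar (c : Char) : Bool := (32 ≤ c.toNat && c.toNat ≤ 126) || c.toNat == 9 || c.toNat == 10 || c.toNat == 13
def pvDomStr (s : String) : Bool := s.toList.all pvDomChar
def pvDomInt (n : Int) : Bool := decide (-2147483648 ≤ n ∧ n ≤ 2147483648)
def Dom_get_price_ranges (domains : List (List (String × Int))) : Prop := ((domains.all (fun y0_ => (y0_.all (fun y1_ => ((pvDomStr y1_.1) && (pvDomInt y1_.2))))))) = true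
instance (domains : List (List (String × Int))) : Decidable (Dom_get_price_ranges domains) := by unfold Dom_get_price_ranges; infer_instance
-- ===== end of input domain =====

-- B replaces A's per-element if/elif counter updates by cumulative "count below each boundary"
-- passes whose consecutive differences give the bucket sizes (objective: alternative).


-- ===== PORT A =====
-- loop body of A's for-loop (the if/elif cascade updating the counter dict)
def gprStep (ranges : PySem.Dict String Int) (domain : List (String × Int)) : PySem.Dict String Int :=
  let price := (PySem.Dict.ofList domain).getD "price" 0
  if price < 20 then ranges.modify "under_20" 0 (· + 1)
  else if price < 50 then ranges.modify "20_to_50" 0 (· + 1)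
  else if price < 100 then ranges.modify "50_to_100" 0 (· + 1)
  else ranges.modify "over_100" 0 (· + 1)

def get_price_ranges (domains : List (List (String × Int))) : List (String × Int) :=
  let ranges : PySem.Dict String Int :=
    ((((PySem.Dict.empty.insert "under_20" 0).insert "20_to_50" 0).insert "50_to_100" 0).insert "over_100" 0)
  (domains.foldl gprStep ranges).items

-- ===== PORT B =====
def get_price_ranges_alt (domains : List (List (String × Int))) : List (String × Int) :=
  let prices := domains.map (fun d => (PySem.Dict.ofList d).getD "price" 0)
  let cuts : List Int :=
    [0] ++ ([(20 : Int), 50, 100].map (fun b => ((prices.countP (fun p => decide (p < b))) : Int))) ++ [(prices.length : Int)]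
  let keys := ["under_20", "20_to_50", "50_to_100", "over_100"]
  (keys.zip (List.zipWith (fun lo hi => hi - lo) cuts cuts.tail)).map (fun (k, v) => (k, v))

-- ===== PRECONDITION & SPEC =====
def Spec_get_price_ranges (domains : List (List (String × Int))) (out : List (String × Int)) : Prop := out = get_price_ranges_alt domains
instance (domains : List (List (String × Int))) (out : List (String × Int)) : Decidable (Spec_get_price_ranges domains out) := by unfold Spec_get_price_ranges; infer_instance

-- ===== CLAIM (what is proved, stated in full; the proofs are below) =====
def Claim_equal_get_price_ranges : Prop := ∀ (domains : List (List (String × Int))), Dom_get_price_ranges domains → Spec_get_price_ranges domains (get_price_ranges domains)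

-- ===== LEMMAS AND PROOFS =====

-- the price of one domain dict, as both ports compute it
def gprPrice (d : List (String × Int)) : Int := (PySem.Dict.ofList d).getD "price" 0

lemma gprStep_mk (d : List (String × Int)) (a b c e : Int) :
    gprStep (PySem.Dict.mk [("under_20", a), ("20_to_50", b), ("50_to_100", c), ("over_100", e)]) d
    = (if gprPrice d < 20 then PySem.Dict.mk [("under_20", a + 1), ("20_to_50", b), ("50_to_100", c), ("over_100", e)]
       else if gprPrice d < 50 then PySem.Dict.mk [("under_20", a), ("20_to_50", b + 1), ("50_to_100", c), ("over_100", e)]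
       else if gprPrice d < 100 then PySem.Dict.mk [("under_20", a), ("20_to_50", b), ("50_to_100", c + 1), ("over_100", e)]
       else PySem.Dict.mk [("under_20", a), ("20_to_50", b), ("50_to_100", c), ("over_100", e + 1)]) := by
  simp only [gprStep, gprPrice]
  split_ifs <;>
    simp [PySem.Dict.modify, PySem.Dict.insert, PySem.Dict.contains, PySem.Dict.getD,
      PySem.Dict.get?]

-- A's loop, with every counter expressed as a difference of cumulative "count below" values
lemma gprLoop (domains : List (List (String × Int))) (a b c e : Int) :
    domains.foldl gprStep (PySem.Dict.mk [("under_20", a), ("20_to_50", b), ("50_to_100", c), ("over_100", e)])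
    = PySem.Dict.mk
        [("under_20", a + (domains.countP (fun d => decide (gprPrice d < 20)) : Int)),
         ("20_to_50", b + ((domains.countP (fun d => decide (gprPrice d < 50)) : Int)
                           - (domains.countP (fun d => decide (gprPrice d < 20)) : Int))),
         ("50_to_100", c + ((domains.countP (fun d => decide (gprPrice d < 100)) : Int)
                           - (domains.countP (fun d => decide (gprPrice d < 50)) : Int))),
         ("over_100", e + ((domains.length : Int)
                           - (domains.countP (fun d => decide (gprPrice d < 100)) : Int)))] := by
  induction domains generalizing a b c e with
  | nil => simp
  | cons d ds ih =>
    rw [List.foldl_cons, gprStep_mk]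
    split_ifs with h1 h2 h3
    · have h2 : gprPrice d < 50 := by omega
      have h3 : gprPrice d < 100 := by omega
      rw [ih (a + 1) b c e]
      simp only [List.countP_cons, List.length_cons, h1, h2, h3, decide_true,
        if_true, PySem.Dict.mk.injEq, List.cons.injEq, Prod.mk.injEq, true_and, and_true]
      all_goals refine ⟨?_, ?_, ?_, ?_⟩ <;> push_cast <;> ring
    · have h3 : gprPrice d < 100 := by omega
      rw [ih a (b + 1) c e]
      simp only [List.countP_cons, List.length_cons, h1, h2, h3, decide_true, decide_false,
        if_true, PySem.Dict.mk.injEq, List.cons.injEq, Prod.mk.injEq, true_and, and_true]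
      all_goals refine ⟨?_, ?_, ?_, ?_⟩ <;> push_cast <;> ring
    · rw [ih a b (c + 1) e]
      simp only [List.countP_cons, List.length_cons, h1, h2, h3, decide_true, decide_false,
        if_true, PySem.Dict.mk.injEq, List.cons.injEq, Prod.mk.injEq, true_and, and_true]
      all_goals refine ⟨?_, ?_, ?_, ?_⟩ <;> push_cast <;> ring
    · rw [ih a b c (e + 1)]
      simp only [List.countP_cons, List.length_cons, h1, h2, h3, decide_false,
        PySem.Dict.mk.injEq, List.cons.injEq, Prod.mk.injEq, true_and, and_true]
      all_goals refine ⟨?_, ?_, ?_, ?_⟩ <;> push_cast <;> ring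

-- ===== VERDICT (by name: the statement is the Claim_ definition above) =====
theorem get_price_ranges_spec : Claim_equal_get_price_ranges := by
  intro domains _
  unfold Spec_get_price_ranges
  simp only [get_price_ranges, get_price_ranges_alt]
  have hmk : ((((PySem.Dict.empty.insert "under_20" 0).insert "20_to_50" 0).insert "50_to_100" 0).insert "over_100" (0 : Int))
      = PySem.Dict.mk [("under_20", 0), ("20_to_50", 0), ("50_to_100", 0), ("over_100", 0)] := by decide
  rw [hmk, gprLoop]
  simp only [gprPrice, List.countP_map, Function.comp_def, List.length_map, List.map_cons,
    List.map_nil, List.cons_append, List.nil_append, List.tail_cons, List.zip,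
    List.zipWith_cons_cons, List.zipWith_nil_right]
  norm_num
  exact ⟨rfl, rfl, rfl, rfl⟩
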